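-- pv_equiv track=rewrite | github.com/almogboaron/IntroToCsCourseExtended | Hw/hw5_313119265.py | prefix_suffix_overlap_hash1
-- ===== SOURCE A (Python) =====
-- class Dict:
--     def __init__(self, m, hash_func=hash):
--         """ initial hash table, m empty entries """
--         self.table = [[] for i in range(m)]
--         self.hash_mod = lambda x: hash_func(x) % m
--
--     def __repr__(self):
--         L = [self.table[i] for i in range(len(self.table))]
--         return "".join([str(i) + " " + str(L[i]) + "\n" for i in range(len(self.table))])
--
--     def insert(self, key, value):
--         """ insert key,value into table
--             Allow repetitions of keys """
--         i = self.hash_mod(key)  # hash on key only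
--         item = [key, value]  # pack into one item
--         self.table[i].append(item)
--
--     def find(self, key):
--         """ returns ALL values of key as a list, empty list if none """
--         i = self.hash_mod(key)
--         bag_of_vals = []
--         for node in self.table[i]:
--             if node[0]==key:
--                 bag_of_vals.append(node[1])
--         return bag_of_vals
--
-- def prefix_suffix_overlap_hash1(lst, k):
--     d = Dict(len(lst))
--     bag_of_tuples = []
--     for i,str in enumerate(lst):
--         d.insert(str[:k],i)
--     for j,str2 in enumerate(lst):
--         for val in d.find(str2[-k:]):
--             if val == j:
--                 continue
--             bag_of_tuples.append((val,j))
--     return bag_of_tuples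
-- ===== SOURCE B (Python) =====
-- def prefix_suffix_overlap_hash1(lst, k):
--     res = []
--     for j, t in enumerate(lst):
--         suf = t[-k:]
--         for i, s in enumerate(lst):
--             if i != j and s[:k] == suf:
--                 res.append((i, j))
--     return res
-- ===== Notes on version B (the rewrite author's own statement) =====
-- stated objective: simpler
-- what changed: Replaced A's hand-rolled hash table (build an index of prefixes, then look up each suffix in its bucket and filter by key) with a plain j-outer/i-inner double scan comparing lst[i][:k] to lst[j][-k:] directly.
import Mathlib
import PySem

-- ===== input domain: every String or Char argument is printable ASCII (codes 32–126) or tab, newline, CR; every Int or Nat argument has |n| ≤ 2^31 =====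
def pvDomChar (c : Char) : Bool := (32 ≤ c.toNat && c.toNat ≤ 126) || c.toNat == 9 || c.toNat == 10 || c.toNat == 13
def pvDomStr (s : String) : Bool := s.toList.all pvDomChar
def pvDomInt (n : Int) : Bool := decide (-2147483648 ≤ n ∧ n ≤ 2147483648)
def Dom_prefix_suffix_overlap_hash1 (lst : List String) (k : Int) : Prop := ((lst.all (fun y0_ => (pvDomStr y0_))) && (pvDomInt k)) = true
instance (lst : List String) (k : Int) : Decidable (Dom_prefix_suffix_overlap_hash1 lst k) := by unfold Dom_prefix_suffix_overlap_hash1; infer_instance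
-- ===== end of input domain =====

-- B replaces A's hand-rolled hash table (index prefixes, look up each suffix) with a
-- direct j-outer/i-inner double scan: simpler, same output on every input.

-- ===== PORT A =====
-- A's Dict uses an arbitrary hash_func; the returned value is independent of it (find
-- filters its bucket by key equality, and equal keys always share a bucket), so the port
-- fixes a concrete deterministic hash (sum of code points).  Buckets = List of lists.
def pvHashA (s : String) : Nat := s.toList.foldl (fun a c => a + c.toNat) 0

-- i = self.hash_mod(key)
def pvIdxA (m : Nat) (key : String) : Nat := pvHashA key % m

-- Dict.insert: self.table[i].append([key, value])
def pvInsertA (m : Nat) (t : List (List (String × Int))) (key : String) (v : Int) :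
    List (List (String × Int)) :=
  let i := pvIdxA m key
  t.set i (t.getD i [] ++ [(key, v)])

-- Dict.find: scan bucket i, collect values whose key matches
def pvFindA (m : Nat) (t : List (List (String × Int))) (key : String) : List Int :=
  let i := pvIdxA m key
  (t.getD i []).foldl (fun acc node => if node.1 = key then acc ++ [node.2] else acc) []

def prefix_suffix_overlap_hash1 (lst : List String) (k : Int) : List (Int × Int) :=
  let m := lst.length
  -- d = Dict(len(lst)); for i,str in enumerate(lst): d.insert(str[:k], i)
  let d := (PySem.List.enumerate lst).foldl
    (fun t p => pvInsertA m t (PySem.Str.slice p.2 none (some k)) p.1)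
    (List.replicate m [])
  -- for j,str2 in enumerate(lst): for val in d.find(str2[-k:]): …
  (PySem.List.enumerate lst).foldl
    (fun bag q =>
      (pvFindA m d (PySem.Str.slice q.2 (some (-k)) none)).foldl
        (fun b val => if val = q.1 then b else b ++ [(val, q.1)]) bag)
    []

-- ===== PORT B =====
def prefix_suffix_overlap_hash1_alt (lst : List String) (k : Int) : List (Int × Int) :=
  (PySem.List.enumerate lst).foldl
    (fun res q =>
      let suf := PySem.Str.slice q.2 (some (-k)) none
      (PySem.List.enumerate lst).foldl
        (fun r p =>
          if p.1 ≠ q.1 ∧ PySem.Str.slice p.2 none (some k) = suf then r ++ [(p.1, q.1)]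
          else r)
        res)
    []

-- ===== PRECONDITION & SPEC =====
def Spec_prefix_suffix_overlap_hash1 (lst : List String) (k : Int) (out : List (Int × Int)) : Prop := out = prefix_suffix_overlap_hash1_alt lst k
instance (lst : List String) (k : Int) (out : List (Int × Int)) : Decidable (Spec_prefix_suffix_overlap_hash1 lst k out) := by unfold Spec_prefix_suffix_overlap_hash1; infer_instance

-- ===== CLAIM (what is proved, stated in full; the proofs are below) =====
def Claim_equal_prefix_suffix_overlap_hash1 : Prop := ∀ (lst : List String) (k : Int), Dom_prefix_suffix_overlap_hash1 lst k → Spec_prefix_suffix_overlap_hash1 lst k (prefix_suffix_overlap_hash1 lst k)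

-- ===== LEMMAS AND PROOFS =====

theorem pvInsertA_length (m : Nat) (t : List (List (String × Int))) (key : String) (v : Int) :
    (pvInsertA m t key v).length = t.length := by
  simp [pvInsertA]

-- find after a single insert: the new pair shows up at the end iff its key matches
theorem pvFindA_insert (m : Nat) (hm : 0 < m) (t : List (List (String × Int)))
    (ht : t.length = m) (key' : String) (v : Int) (key : String) :
    pvFindA m (pvInsertA m t key' v) key
      = pvFindA m t key ++ (if key' = key then [v] else []) := by
  have hlt : pvIdxA m key' < t.length := by
    simpa [ht] using Nat.mod_lt (pvHashA key') hm
  by_cases hidx : pvIdxA m key = pvIdxA m key'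
  · have hb : (pvInsertA m t key' v).getD (pvIdxA m key) []
        = t.getD (pvIdxA m key) [] ++ [(key', v)] := by
      simp [pvInsertA, hidx, List.getD_eq_getElem?_getD, List.getElem?_set_self hlt]
    simp only [pvFindA, hb, List.foldl_append, List.foldl_cons, List.foldl_nil]
    by_cases hk : key' = key <;> simp [hk]
  · have hb : (pvInsertA m t key' v)[pvIdxA m key]? = t[pvIdxA m key]? := by
      simp [pvInsertA, List.getElem?_set_ne (by exact fun h => hidx h.symm)]
    have hk : key' ≠ key := by
      intro h; exact hidx (by rw [h])
    simp [pvFindA, hk, List.getD_eq_getElem?_getD, hb]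

-- find after folding a whole insertion sequence
theorem pvFindA_foldl (m : Nat) (hm : 0 < m) (ps : List (String × Int))
    (t : List (List (String × Int))) (ht : t.length = m) (key : String) :
    pvFindA m (ps.foldl (fun t p => pvInsertA m t p.1 p.2) t) key
      = pvFindA m t key ++ (ps.filter (fun p => p.1 = key)).map (·.2) := by
  induction ps generalizing t with
  | nil => simp
  | cons p ps ih =>
    simp only [List.foldl_cons]
    rw [ih (pvInsertA m t p.1 p.2) (by rw [pvInsertA_length, ht]),
        pvFindA_insert m hm t ht p.1 p.2 key]
    by_cases hk : p.1 = key <;> simp [hk]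

theorem pvFindA_replicate (m : Nat) (key : String) :
    pvFindA m (List.replicate m []) key = [] := by
  simp [pvFindA, List.getD_eq_getElem?_getD, List.getElem?_replicate]
  split <;> simp

-- A's inner loop ('if val == j: continue; append')
theorem innerA_eq (l : List Int) (j : Int) (b : List (Int × Int)) :
    l.foldl (fun b val => if val = j then b else b ++ [(val, j)]) b
      = b ++ (l.filter (fun v => v ≠ j)).map (fun v => (v, j)) := by
  rw [show (fun (b : List (Int × Int)) val => if val = j then b else b ++ [(val, j)])
        = (fun b val => if (fun v => decide (v ≠ j)) val = true then b ++ [(val, j)] else b) from by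
      funext b v; by_cases h : v = j <;> simp [h]]
  exact PySem.List.foldl_append_if _ _ _ _

theorem prefix_suffix_overlap_hash1_eq (lst : List String) (k : Int) :
    prefix_suffix_overlap_hash1 lst k = prefix_suffix_overlap_hash1_alt lst k := by
  cases lst with
  | nil => rfl
  | cons x xs =>
    have hm : 0 < (x :: xs).length := by simp
    simp only [prefix_suffix_overlap_hash1, prefix_suffix_overlap_hash1_alt]
    -- characterise d.find after the insertion loop
    have hfind : ∀ key : String,
        pvFindA (x :: xs).length
          ((PySem.List.enumerate (x :: xs)).foldl
            (fun t p => pvInsertA (x :: xs).length t (PySem.Str.slice p.2 none (some k)) p.1)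
            (List.replicate (x :: xs).length []))
          key
        = ((PySem.List.enumerate (x :: xs)).filter
            (fun p => PySem.Str.slice p.2 none (some k) = key)).map (·.1) := by
      intro key
      rw [show (PySem.List.enumerate (x :: xs)).foldl
            (fun t p => pvInsertA (x :: xs).length t (PySem.Str.slice p.2 none (some k)) p.1)
            (List.replicate (x :: xs).length [])
          = ((PySem.List.enumerate (x :: xs)).map
              (fun p => (PySem.Str.slice p.2 none (some k), p.1))).foldl
              (fun t p => pvInsertA (x :: xs).length t p.1 p.2)
              (List.replicate (x :: xs).length []) from by rw [List.foldl_map]]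
      rw [pvFindA_foldl _ hm _ _ (by simp) key, pvFindA_replicate]
      rw [List.filter_map, List.map_map]
      simp only [Function.comp_def, List.nil_append]
    rw [show (fun (bag : List (Int × Int)) (q : Int × String) =>
          (pvFindA (x :: xs).length
            ((PySem.List.enumerate (x :: xs)).foldl
              (fun t p => pvInsertA (x :: xs).length t (PySem.Str.slice p.2 none (some k)) p.1)
              (List.replicate (x :: xs).length []))
            (PySem.Str.slice q.2 (some (-k)) none)).foldl
            (fun b val => if val = q.1 then b else b ++ [(val, q.1)]) bag)
        = (fun bag q => bag ++
            ((PySem.List.enumerate (x :: xs)).filter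
              (fun p => p.1 ≠ q.1 ∧ PySem.Str.slice p.2 none (some k)
                  = PySem.Str.slice q.2 (some (-k)) none)).map (fun p => (p.1, q.1))) from by
      funext bag q
      rw [hfind, innerA_eq]
      rw [List.filter_map, List.map_map, List.filter_filter]
      simp only [Function.comp_def]
      exact congrArg _ (congrArg _ (List.filter_congr (fun a _ => by simp)))]
    rw [PySem.List.foldl_append_eq_flatMap]
    rw [show (fun (res : List (Int × Int)) (q : Int × String) =>
          (PySem.List.enumerate (x :: xs)).foldl
            (fun r p =>
              if p.1 ≠ q.1 ∧ PySem.Str.slice p.2 none (some k)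
                  = PySem.Str.slice q.2 (some (-k)) none then r ++ [(p.1, q.1)] else r)
            res)
        = (fun res q => res ++
            ((PySem.List.enumerate (x :: xs)).filter
              (fun p => p.1 ≠ q.1 ∧ PySem.Str.slice p.2 none (some k)
                  = PySem.Str.slice q.2 (some (-k)) none)).map (fun p => (p.1, q.1))) from by
      funext res q
      rw [show (fun (r : List (Int × Int)) (p : Int × String) =>
            if p.1 ≠ q.1 ∧ PySem.Str.slice p.2 none (some k)
                = PySem.Str.slice q.2 (some (-k)) none then r ++ [(p.1, q.1)] else r)
          = (fun r p => if (fun p : Int × String => decide (p.1 ≠ q.1 ∧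
                PySem.Str.slice p.2 none (some k) = PySem.Str.slice q.2 (some (-k)) none)) p = true
              then r ++ [(p.1, q.1)] else r) from by
        funext r p; simp]
      rw [PySem.List.foldl_append_if]]
    rw [PySem.List.foldl_append_eq_flatMap]

-- ===== VERDICT (by name: the statement is the Claim_ definition above) =====
theorem prefix_suffix_overlap_hash1_spec : Claim_equal_prefix_suffix_overlap_hash1 := by
  intro lst k _
  unfold Spec_prefix_suffix_overlap_hash1
  exact prefix_suffix_overlap_hash1_eq lst k
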